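-- pv_equiv track=rewrite | github.com/avengerandy/leetcode | codility/06_Sorting_Triangle/index.py | solution
-- ===== SOURCE A (Python) =====
-- def solution(A):
--     A = list(filter(lambda x: x > 0, A))
--
--     totalSize = len(A)
--     if (totalSize < 3):
--         return 0
--
--     A.sort()
--     for index in range(totalSize - 2):
--         if (
--             (A[index] + A[index + 1] > A[index + 2]) and
--             (A[index + 1] + A[index + 2] > A[index]) and
--             (A[index + 2] + A[index] > A[index + 1])
--         ):
--             return 1
--     return 0
-- ===== SOURCE B (Python) =====
-- def solution(A):
--     P = [x for x in A if x > 0]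
--     return 1 if _any_triple(P) else 0
--
--
-- def _any_triple(lst):
--     if not lst:
--         return False
--     a, rest = lst[0], lst[1:]
--     return _any_pair(a, rest) or _any_triple(rest)
--
--
-- def _any_pair(a, lst):
--     if not lst:
--         return False
--     b, rest = lst[0], lst[1:]
--     return any(a + b > c and b + c > a and c + a > b for c in rest) or _any_pair(a, rest)
-- ===== Notes on version B (the rewrite author's own statement) =====
-- stated objective: alternative
-- what changed: Replaces A's sort + consecutive-index scan over the sorted positives by a direct structural-recursion search over all 3-element sub-sequences of the filtered positives (no sort, no indexing).
import Mathlib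
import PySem

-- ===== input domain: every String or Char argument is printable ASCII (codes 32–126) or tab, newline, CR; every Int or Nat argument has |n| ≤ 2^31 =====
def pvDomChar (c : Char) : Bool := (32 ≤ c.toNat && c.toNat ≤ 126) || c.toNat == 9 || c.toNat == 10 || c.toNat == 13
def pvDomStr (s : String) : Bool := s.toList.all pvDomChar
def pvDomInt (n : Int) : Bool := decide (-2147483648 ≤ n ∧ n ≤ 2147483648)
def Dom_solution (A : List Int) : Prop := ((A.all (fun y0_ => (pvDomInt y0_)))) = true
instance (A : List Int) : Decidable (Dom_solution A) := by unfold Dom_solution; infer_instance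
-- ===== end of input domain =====

-- B replaces A's sort + consecutive-triple scan by a direct exhaustive search over all
-- 3-element sub-sequences of the positive elements (objective: alternative, no sort needed).

-- ===== PORT A =====
-- A sorts the filtered list and scans consecutive index triples, returning at the first hit;
-- the early-returning for-loop is ported as `List.any` over the same range (same traversal,
-- stops at the first true).  pyGetD … 0 is exact here: every index used lies in range.
def solution (A : List Int) : Int :=
  let A1 := A.filter (fun x => decide (x > 0))
  let totalSize : Int := A1.length
  if totalSize < 3 then 0
  else
    let S := PySem.List.sorted A1 (fun x => x) false
    if (PySem.List.pyRange 0 (totalSize - 2) 1).any (fun index =>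
         decide (PySem.List.pyGetD S index 0 + PySem.List.pyGetD S (index + 1) 0 >
                   PySem.List.pyGetD S (index + 2) 0) &&
         decide (PySem.List.pyGetD S (index + 1) 0 + PySem.List.pyGetD S (index + 2) 0 >
                   PySem.List.pyGetD S index 0) &&
         decide (PySem.List.pyGetD S (index + 2) 0 + PySem.List.pyGetD S index 0 >
                   PySem.List.pyGetD S (index + 1) 0))
    then 1 else 0

-- ===== PORT B =====
-- `_any_pair a lst` from Source B: some b (head of a suffix) and some later c with a,b,c a triangle.
def anyPairB (a : Int) : List Int → Bool
  | [] => false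
  | b :: rest =>
      rest.any (fun c => decide (a + b > c) && decide (b + c > a) && decide (c + a > b)) ||
      anyPairB a rest

-- `_any_triple lst` from Source B: structural recursion over the list.
def anyTripleB : List Int → Bool
  | [] => false
  | a :: rest => anyPairB a rest || anyTripleB rest

def solution_alt (A : List Int) : Int :=
  if anyTripleB (A.filter (fun x => decide (x > 0))) then 1 else 0

-- ===== PRECONDITION & SPEC =====
def Spec_solution (A : List Int) (out : Int) : Prop := out = solution_alt A
instance (A : List Int) (out : Int) : Decidable (Spec_solution A out) := by unfold Spec_solution; infer_instance

-- ===== CLAIM (what is proved, stated in full; the proofs are below) =====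
def Claim_equal_solution : Prop := ∀ (A : List Int), Dom_solution A → Spec_solution A (solution A)

-- ===== LEMMAS AND PROOFS =====

-- The triangle test of Source B's inner generator, as a named Bool.
def triB (a b c : Int) : Bool :=
  decide (a + b > c) && decide (b + c > a) && decide (c + a > b)

lemma triB_iff (a b c : Int) :
    triB a b c = true ↔ a + b + c > 2 * a ∧ a + b + c > 2 * b ∧ a + b + c > 2 * c := by
  simp [triB]; omega

lemma anyPairB_iff (a : Int) (L : List Int) :
    anyPairB a L = true ↔ ∃ b c, ([b, c] : List Int).Sublist L ∧ triB a b c = true := by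
  induction L with
  | nil => simp [anyPairB]
  | cons b rest ih =>
    simp only [anyPairB, Bool.or_eq_true, List.any_eq_true, ih]
    constructor
    · rintro (⟨c, hc, ht⟩ | ⟨b', c', hs, ht⟩)
      · exact ⟨b, c, List.Sublist.cons₂ _ ((List.singleton_sublist).2 hc), by
          simpa [triB] using ht⟩
      · exact ⟨b', c', hs.cons _, ht⟩
    · rintro ⟨b', c', hs, ht⟩
      rcases List.sublist_cons_iff.1 hs with h | ⟨r, hr, hrs⟩
      · exact Or.inr ⟨b', c', h, ht⟩
      · cases hr
        refine Or.inl ⟨c', List.singleton_sublist.1 ?_, by simpa [triB] using ht⟩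
        simpa using hrs

lemma anyTripleB_iff (L : List Int) :
    anyTripleB L = true ↔ ∃ x y z, ([x, y, z] : List Int).Sublist L ∧ triB x y z = true := by
  induction L with
  | nil => simp [anyTripleB]
  | cons a rest ih =>
    simp only [anyTripleB, Bool.or_eq_true, anyPairB_iff, ih]
    constructor
    · rintro (⟨b, c, hs, ht⟩ | ⟨x, y, z, hs, ht⟩)
      · exact ⟨a, b, c, List.Sublist.cons₂ _ hs, ht⟩
      · exact ⟨x, y, z, hs.cons _, ht⟩
    · rintro ⟨x, y, z, hs, ht⟩
      rcases List.sublist_cons_iff.1 hs with h | ⟨r, hr, hrs⟩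
      · exact Or.inr ⟨x, y, z, h, ht⟩
      · cases hr
        exact Or.inl ⟨y, z, hrs, ht⟩

-- any triple subpermuted into L with the triangle property is found by anyTripleB
lemma anyTripleB_of_subperm (L : List Int) (x y z : Int)
    (h : ([x, y, z] : List Int).Subperm L) (ht : triB x y z = true) :
    anyTripleB L = true := by
  rcases h with ⟨l, hperm, hsub⟩
  have hlen : l.length = 3 := by simpa using hperm.length_eq
  match l, hlen, hperm, hsub with
  | [p, q, r], _, hperm, hsub =>
    have hmemp : p ∈ ([x, y, z] : List Int) := hperm.subset (by simp)
    have hmemq : q ∈ ([x, y, z] : List Int) := hperm.subset (by simp)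
    have hmemr : r ∈ ([x, y, z] : List Int) := hperm.subset (by simp)
    have hsum : p + (q + r) = x + (y + z) := by simpa using hperm.sum_eq
    have ht' := (triB_iff x y z).1 ht
    have : triB p q r = true := by
      rw [triB_iff]
      simp only [List.mem_cons, List.not_mem_nil, or_false] at hmemp hmemq hmemr
      rcases hmemp with h1 | h1 | h1 <;> rcases hmemq with h2 | h2 | h2 <;>
        rcases hmemr with h3 | h3 | h3 <;> subst h1 <;> subst h2 <;> subst h3 <;> omega
    exact (anyTripleB_iff L).2 ⟨p, q, r, hsub, this⟩

lemma anyTripleB_perm (L L' : List Int) (h : L.Perm L') : anyTripleB L = anyTripleB L' := by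
  have key : ∀ M M' : List Int, M.Perm M' → anyTripleB M = true → anyTripleB M' = true := by
    intro M M' hp hM
    rcases (anyTripleB_iff M).1 hM with ⟨x, y, z, hs, ht⟩
    exact anyTripleB_of_subperm M' x y z (hs.subperm.trans hp.subperm) ht
  cases hL : anyTripleB L
  · cases hL' : anyTripleB L'
    · rfl
    · exact absurd (key L' L h.symm hL') (by simp [hL])
  · exact (key L L' h hL).symm

-- three consecutive elements form a sublist
lemma consecutive_sublist (S : List Int) (k : Nat) (h : k + 2 < S.length) :
    ([S[k], S[k+1], S[k+2]] : List Int).Sublist S := by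
  have h1 : S.drop k = S[k] :: S.drop (k + 1) := List.drop_eq_getElem_cons (by omega)
  have h2 : S.drop (k + 1) = S[k+1] :: S.drop (k + 2) := List.drop_eq_getElem_cons (by omega)
  have h3 : S.drop (k + 2) = S[k+2] :: S.drop (k + 3) := List.drop_eq_getElem_cons (by omega)
  have hsub : ([S[k], S[k+1], S[k+2]] : List Int).Sublist (S.drop k) := by
    rw [h1, h2, h3]
    exact List.Sublist.cons₂ _ (List.Sublist.cons₂ _ (List.Sublist.cons₂ _ (List.nil_sublist _)))
  exact hsub.trans (List.drop_sublist k S)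

-- ===== VERDICT (by name: the statement is the Claim_ definition above) =====
theorem solution_spec : Claim_equal_solution := by
  intro A _
  unfold Spec_solution solution solution_alt
  dsimp only
  set P := A.filter (fun x => decide (x > 0)) with hP
  set S := PySem.List.sorted P (fun x => x) false with hS
  have hperm : S.Perm P := PySem.List.sorted_perm P (fun x => x) false
  have hlenS : S.length = P.length := hperm.length_eq
  have hpos : ∀ x ∈ S, 0 < x := by
    intro x hx
    have : x ∈ P := hperm.mem_iff.1 hx
    rw [hP] at this
    simpa using (List.mem_filter.1 this).2
  -- the value of the pyGetD accesses at an in-range natural index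
  have hget : ∀ (i : Int) (k : Nat) (hk : k < S.length), i = (k : Int) →
      PySem.List.pyGetD S i 0 = S[k]'hk := by
    rintro i k hk rfl
    rw [PySem.List.pyGetD_natCast]
    exact List.getD_eq_getElem S 0 hk
  by_cases hT : anyTripleB P = true
  · -- B returns 1; show A's scan fires
    have hTS : anyTripleB S = true := by rw [anyTripleB_perm S P hperm]; exact hT
    rcases (anyTripleB_iff S).1 hTS with ⟨x, y, z, hsub, ht⟩
    rcases List.sublist_eq_map_getElem hsub with ⟨is, hmap, hpw⟩
    have hlen3 : is.length = 3 := by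
      have := congrArg List.length hmap
      simpa using this.symm
    match is, hlen3, hmap, hpw with
    | [p, q, r], _, hmap, hpw =>
      have hpq : (p : Nat) < q := by
        have := (List.pairwise_cons.1 hpw).1 q (by simp); exact_mod_cast this
      have hqr : (q : Nat) < r := by
        have hpw' := (List.pairwise_cons.1 hpw).2
        have := (List.pairwise_cons.1 hpw').1 r (by simp); exact_mod_cast this
      have hr : (r : Nat) < S.length := r.isLt
      have hx : x = S[(p : Nat)] := by simpa using congrArg (fun l => l.getD 0 0) hmap
      have hy : y = S[(q : Nat)] := by simpa using congrArg (fun l => l.getD 1 0) hmap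
      have hz : z = S[(r : Nat)] := by simpa using congrArg (fun l => l.getD 2 0) hmap
      have hr2 : 2 ≤ (r : Nat) := by omega
      -- sortedness: S[p] ≤ S[r-2], S[q] ≤ S[r-1]
      have hm1 : S[(p : Nat)] ≤ S[(r : Nat) - 2]'(by omega) := by
        simpa using PySem.List.sorted_id_getElem_mono (xs := P) (p := (p : Nat))
          (q := (r : Nat) - 2) (by omega) (by rw [← hS]; omega)
      have hm2 : S[(q : Nat)] ≤ S[(r : Nat) - 1]'(by omega) := by
        simpa using PySem.List.sorted_id_getElem_mono (xs := P) (p := (q : Nat))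
          (q := (r : Nat) - 1) (by omega) (by rw [← hS]; omega)
      have hm3 : S[(r : Nat) - 2]'(by omega) ≤ S[(r : Nat) - 1]'(by omega) := by
        simpa using PySem.List.sorted_id_getElem_mono (xs := P) (p := (r : Nat) - 2)
          (q := (r : Nat) - 1) (by omega) (by rw [← hS]; omega)
      have hm4 : S[(r : Nat) - 1]'(by omega) ≤ S[(r : Nat)] := by
        simpa using PySem.List.sorted_id_getElem_mono (xs := P) (p := (r : Nat) - 1)
          (q := (r : Nat)) (by omega) (by rw [← hS]; omega)
      have hxy : x + y > z := by
        have := (triB_iff x y z).1 ht; omega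
      have hp1 : 0 < S[(r : Nat) - 2]'(by omega) := hpos _ (List.getElem_mem _)
      have hp2 : 0 < S[(r : Nat) - 1]'(by omega) := hpos _ (List.getElem_mem _)
      have hp3 : 0 < S[(r : Nat)] := hpos _ (List.getElem_mem _)
      have hn3 : ¬ ((P.length : Int) < 3) := by omega
      rw [if_neg hn3, if_pos, if_pos hT]
      rw [List.any_eq_true]
      refine ⟨((((r : Nat) - 2 : Nat) : Int)), ?_, ?_⟩
      · rw [PySem.List.mem_pyRange_one]; constructor
        · positivity
        · omega
      · have e0 : PySem.List.pyGetD S ((((r : Nat) - 2 : Nat) : Int)) 0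
            = S[(r : Nat) - 2]'(by omega) :=
          hget ((((r : Nat) - 2 : Nat) : Int)) ((r : Nat) - 2) (by omega) (by omega)
        have e1 : PySem.List.pyGetD S ((((r : Nat) - 2 : Nat) : Int) + 1) 0
            = S[(r : Nat) - 1]'(by omega) :=
          hget ((((r : Nat) - 2 : Nat) : Int) + 1) ((r : Nat) - 1) (by omega) (by omega)
        have e2 : PySem.List.pyGetD S ((((r : Nat) - 2 : Nat) : Int) + 2) 0
            = S[(r : Nat)]'(by omega) :=
          hget ((((r : Nat) - 2 : Nat) : Int) + 2) ((r : Nat)) (by omega) (by omega)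
        rw [e0, e1, e2]
        simp only [Bool.and_eq_true, decide_eq_true_eq]
        subst hx hy hz
        refine ⟨⟨by omega, by omega⟩, by omega⟩
  · -- B returns 0; A's scan cannot fire
    rw [if_neg hT]
    by_cases hn : (P.length : Int) < 3
    · rw [if_pos hn]
    · rw [if_neg hn]
      have hany : ((PySem.List.pyRange 0 ((P.length : Int) - 2) 1).any (fun index =>
         decide (PySem.List.pyGetD S index 0 + PySem.List.pyGetD S (index + 1) 0 >
                   PySem.List.pyGetD S (index + 2) 0) &&
         decide (PySem.List.pyGetD S (index + 1) 0 + PySem.List.pyGetD S (index + 2) 0 >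
                   PySem.List.pyGetD S index 0) &&
         decide (PySem.List.pyGetD S (index + 2) 0 + PySem.List.pyGetD S index 0 >
                   PySem.List.pyGetD S (index + 1) 0))) = false := by
        rw [Bool.eq_false_iff]
        intro hcontra
        rw [List.any_eq_true] at hcontra
        rcases hcontra with ⟨i, hi, hc⟩
        rw [PySem.List.mem_pyRange_one] at hi
        set k := i.toNat with hk
        have hik : i = (k : Int) := by omega
        have hkS : k + 2 < S.length := by omega
        have e0 : PySem.List.pyGetD S i 0 = S[k]'(by omega) := hget i k (by omega) (by omega)
        have e1 : PySem.List.pyGetD S (i + 1) 0 = S[k + 1]'(by omega) := hget (i + 1) (k + 1) (by omega) (by omega)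
        have e2 : PySem.List.pyGetD S (i + 2) 0 = S[k + 2]'(by omega) := hget (i + 2) (k + 2) (by omega) (by omega)
        rw [e0, e1, e2] at hc
        simp only [Bool.and_eq_true, decide_eq_true_eq] at hc
        have : anyTripleB S = true :=
          (anyTripleB_iff S).2 ⟨S[k], S[k+1], S[k+2], consecutive_sublist S k hkS, by
            simp [triB]; omega⟩
        rw [anyTripleB_perm S P hperm] at this
        exact hT this
      rw [hany]
      simp
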